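-- pv_equiv track=rewrite | github.com/sushil32/Neura | services/avatar/lipsync.py | _estimate_phonemes
-- ===== SOURCE A (Python) =====
-- from typing import Dict, List, Optional, Tuple
--
-- def _estimate_phonemes(word: str) -> List[str]:
--     """Simple rule-based phoneme estimation."""
--     phonemes = []
--     word = word.lower()
--
--     # Common digraphs
--     digraphs = {
--         'th': 'TH', 'ch': 'CH', 'sh': 'SH', 'ng': 'NG',
--         'wh': 'W', 'ph': 'F', 'ck': 'K',
--     }
--
--     # Vowel mappings
--     vowel_map = {
--         'a': 'AA', 'e': 'EH', 'i': 'IY', 'o': 'OW', 'u': 'UW',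
--     }
--
--     # Consonant mappings
--     consonant_map = {
--         'b': 'B', 'c': 'K', 'd': 'D', 'f': 'F', 'g': 'G',
--         'h': 'HH', 'j': 'JH', 'k': 'K', 'l': 'L', 'm': 'M',
--         'n': 'N', 'p': 'P', 'q': 'K', 'r': 'R', 's': 'S',
--         't': 'T', 'v': 'V', 'w': 'W', 'x': 'K', 'y': 'Y', 'z': 'Z',
--     }
--
--     i = 0
--     while i < len(word):
--         # Check for digraphs
--         if i < len(word) - 1:
--             digraph = word[i:i+2]
--             if digraph in digraphs:
--                 phonemes.append(digraphs[digraph])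
--                 i += 2
--                 continue
--
--         char = word[i]
--         if char in vowel_map:
--             phonemes.append(vowel_map[char])
--         elif char in consonant_map:
--             phonemes.append(consonant_map[char])
--
--         i += 1
--
--     return phonemes if phonemes else ["AA"]
-- ===== SOURCE B (Python) =====
-- import re
--
-- _DIGRAPHS = {
--     'th': 'TH', 'ch': 'CH', 'sh': 'SH', 'ng': 'NG',
--     'wh': 'W', 'ph': 'F', 'ck': 'K',
-- }
-- _SINGLE = {
--     'a': 'AA', 'e': 'EH', 'i': 'IY', 'o': 'OW', 'u': 'UW',
--     'b': 'B', 'c': 'K', 'd': 'D', 'f': 'F', 'g': 'G',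
--     'h': 'HH', 'j': 'JH', 'k': 'K', 'l': 'L', 'm': 'M',
--     'n': 'N', 'p': 'P', 'q': 'K', 'r': 'R', 's': 'S',
--     't': 'T', 'v': 'V', 'w': 'W', 'x': 'K', 'y': 'Y', 'z': 'Z',
-- }
-- _TOKEN = re.compile('|'.join(_DIGRAPHS) + '|.')
--
-- def _estimate_phonemes(word: str) -> list:
--     """Regex tokenizer: digraphs first, then any single char; map tokens to phonemes."""
--     phonemes = []
--     for m in _TOKEN.finditer(word.lower()):
--         tok = m.group()
--         if len(tok) == 2:
--             phonemes.append(_DIGRAPHS[tok])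
--         else:
--             p = _SINGLE.get(tok)
--             if p is not None:
--                 phonemes.append(p)
--     return phonemes or ["AA"]
-- ===== Notes on version B (the rewrite author's own statement) =====
-- stated objective: idiomatic
-- what changed: Replaced A's explicit index loop with inline digraph lookahead by a compiled regex alternation (digraphs first, then '.') that tokenizes the lowered word in one finditer pass, then maps tokens to phonemes through a single merged dict.
import Mathlib
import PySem

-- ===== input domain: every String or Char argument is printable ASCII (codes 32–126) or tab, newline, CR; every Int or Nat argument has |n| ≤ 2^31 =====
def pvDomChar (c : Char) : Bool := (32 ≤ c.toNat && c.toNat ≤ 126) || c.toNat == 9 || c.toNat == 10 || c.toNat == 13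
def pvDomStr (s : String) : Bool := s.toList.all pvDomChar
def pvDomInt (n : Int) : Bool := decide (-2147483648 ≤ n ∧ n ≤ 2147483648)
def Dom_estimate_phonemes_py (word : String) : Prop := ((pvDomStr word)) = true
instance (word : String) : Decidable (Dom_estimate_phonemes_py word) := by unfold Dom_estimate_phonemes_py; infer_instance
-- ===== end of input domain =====

-- B replaces A's explicit index loop with a tokenize-then-map pipeline (regex maximal munch in Python); objective: idiomatic. Same return value on every input.

-- ===== PORT A =====
-- A's digraph dict, keyed by the two-char slice word[i:i+2] (represented as the char pair)
def pvDigraphsA : PySem.Dict (Char × Char) String :=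
  PySem.Dict.ofList [(('t','h'),"TH"), (('c','h'),"CH"), (('s','h'),"SH"), (('n','g'),"NG"),
                     (('w','h'),"W"), (('p','h'),"F"), (('c','k'),"K")]

def pvVowelMap : PySem.Dict Char String :=
  PySem.Dict.ofList [('a',"AA"), ('e',"EH"), ('i',"IY"), ('o',"OW"), ('u',"UW")]

def pvConsonantMap : PySem.Dict Char String :=
  PySem.Dict.ofList [('b',"B"), ('c',"K"), ('d',"D"), ('f',"F"), ('g',"G"),
                     ('h',"HH"), ('j',"JH"), ('k',"K"), ('l',"L"), ('m',"M"),
                     ('n',"N"), ('p',"P"), ('q',"K"), ('r',"R"), ('s',"S"),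
                     ('t',"T"), ('v',"V"), ('w',"W"), ('x',"K"), ('y',"Y"), ('z',"Z")]

-- the body of A's while-loop after the digraph test failed (or was skipped at the last char)
def pvStepA (acc : List String) (c : Char) : List String :=
  match pvVowelMap.get? c with
  | some p => acc ++ [p]
  | none =>
    match pvConsonantMap.get? c with
    | some p => acc ++ [p]
    | none => acc

-- A's while-loop over the remaining characters, with the `phonemes` accumulator
def pvLoopA : List Char → List String → List String
  | [], acc => acc
  | [c], acc => pvStepA acc c
  | c1 :: c2 :: rest, acc =>
    match pvDigraphsA.get? (c1, c2) with
    | some p => pvLoopA rest (acc ++ [p])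
    | none => pvLoopA (c2 :: rest) (pvStepA acc c1)

def estimate_phonemes_py (word : String) : List String :=
  let phonemes := pvLoopA (PySem.Str.lower word).toList []
  if phonemes = [] then ["AA"] else phonemes

-- ===== PORT B =====
-- Source B's merged single-char map _SINGLE
def pvSingleB : PySem.Dict Char String :=
  PySem.Dict.ofList [('a',"AA"), ('e',"EH"), ('i',"IY"), ('o',"OW"), ('u',"UW"),
                     ('b',"B"), ('c',"K"), ('d',"D"), ('f',"F"), ('g',"G"),
                     ('h',"HH"), ('j',"JH"), ('k',"K"), ('l',"L"), ('m',"M"),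
                     ('n',"N"), ('p',"P"), ('q',"K"), ('r',"R"), ('s',"S"),
                     ('t',"T"), ('v',"V"), ('w',"W"), ('x',"K"), ('y',"Y"), ('z',"Z")]

-- finditer of the alternation 'th|ch|sh|ng|wh|ph|ck|.': at each position try a digraph,
-- else '.' (any char except '\n'), else no match there and scanning resumes one char later
def pvTokensB : List Char → List (List Char)
  | [] => []
  | [c] => if c = '\n' then [] else [[c]]
  | c1 :: c2 :: rest =>
    if (pvDigraphsA.get? (c1, c2)).isSome then [c1, c2] :: pvTokensB rest
    else if c1 = '\n' then pvTokensB (c2 :: rest)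
    else [c1] :: pvTokensB (c2 :: rest)

-- map a token to its phoneme: 2-char tokens through the digraph dict, 1-char through _SINGLE.get
def pvPhonemeOfToken (t : List Char) : Option String :=
  match t with
  | [c1, c2] => pvDigraphsA.get? (c1, c2)
  | [c] => pvSingleB.get? c
  | _ => none

def estimate_phonemes_py_alt (word : String) : List String :=
  let phonemes := (pvTokensB (PySem.Str.lower word).toList).filterMap pvPhonemeOfToken
  if phonemes = [] then ["AA"] else phonemes

-- ===== PRECONDITION & SPEC =====
def Spec_estimate_phonemes_py (word : String) (out : List String) : Prop := out = estimate_phonemes_py_alt word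
instance (word : String) (out : List String) : Decidable (Spec_estimate_phonemes_py word out) := by unfold Spec_estimate_phonemes_py; infer_instance

-- ===== CLAIM (what is proved, stated in full; the proofs are below) =====
def Claim_equal_estimate_phonemes_py : Prop := ∀ (word : String), Dom_estimate_phonemes_py word → Spec_estimate_phonemes_py word (estimate_phonemes_py word)

-- ===== LEMMAS AND PROOFS =====

-- Source B's merged map is A's vowel entries followed by A's consonant entries
theorem pvSingleB_items : pvSingleB.items = pvVowelMap.items ++ pvConsonantMap.items := by decide

-- A's vowel-then-consonant chain is one lookup in the merged map
theorem pvStepA_eq (acc : List String) (c : Char) :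
    pvStepA acc c = acc ++ (pvSingleB.get? c).toList := by
  rw [pvStepA]
  simp only [PySem.Dict.get?, pvSingleB_items, List.find?_append]
  cases hv : List.find? (fun p => p.1 == c) pvVowelMap.items <;>
    cases hc : List.find? (fun p => p.1 == c) pvConsonantMap.items <;> simp

theorem pvSingleB_newline : pvSingleB.get? '\n' = none := by decide

-- filterMap through a single-char token
theorem pvFilterMap_single (c : Char) (rest : List (List Char)) :
    List.filterMap pvPhonemeOfToken ([c] :: rest)
      = (pvSingleB.get? c).toList ++ List.filterMap pvPhonemeOfToken rest := by
  cases h : pvSingleB.get? c <;> simp [pvPhonemeOfToken, h]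

theorem pvLoopA_eq_tokens (cs : List Char) (acc : List String) :
    pvLoopA cs acc = acc ++ (pvTokensB cs).filterMap pvPhonemeOfToken := by
  fun_induction pvLoopA cs acc with
  | case1 acc => simp [pvTokensB]
  | case2 c acc =>
    rw [pvStepA_eq, pvTokensB]
    by_cases h : c = '\n'
    · subst h; simp [pvSingleB_newline]
    · rw [if_neg h, pvFilterMap_single]; simp
  | case3 c1 c2 rest acc p hget ih =>
    rw [ih, pvTokensB]
    simp [hget, pvPhonemeOfToken]
  | case4 c1 c2 rest acc hget ih =>
    rw [ih, pvStepA_eq, pvTokensB]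
    simp only [hget, Option.isSome_none, Bool.false_eq_true, if_false]
    by_cases h : c1 = '\n'
    · subst h; simp [pvSingleB_newline]
    · rw [if_neg h, pvFilterMap_single]; simp

-- ===== VERDICT (by name: the statement is the Claim_ definition above) =====
theorem estimate_phonemes_py_spec : Claim_equal_estimate_phonemes_py := by
  intro word _
  unfold Spec_estimate_phonemes_py estimate_phonemes_py estimate_phonemes_py_alt
  rw [pvLoopA_eq_tokens]
  simp
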